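-- pv_equiv track=rewrite | github.com/ck46/qa-qg | qg_pipeline.py | prepare_inputs_prefix
-- ===== SOURCE A (Python) =====
-- def prepare_inputs_prefix(answers, sents):
--   qg_inputs = []
--   qg_examples = []
--   loaded = dict()
--   for answer in answers:
--     for answer_text in answer:
--       if answer_text in loaded:
--         continue
--       else:
--         loaded[answer_text] = 1
--       for sent in sents:
--         if answer_text in sent:
--           source_text = f"context: {sent} answer: {answer_text} </s>"
--           qg_inputs.append(source_text)
--           qg_examples.append({'answer': answer_text, "source_text": source_text})
--   return qg_inputs, qg_examples
-- ===== SOURCE B (Python) =====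
-- def prepare_inputs_prefix(answers, sents):
--   # transposed matching: sentence-major scan filling per-answer buckets, then decoupled emission
--   unique = list(dict.fromkeys(t for answer in answers for t in answer))
--   buckets = [[] for _ in unique]
--   for sent in sents:
--     buckets = [b + [sent] if t in sent else b for t, b in zip(unique, buckets)]
--   qg_inputs = []
--   qg_examples = []
--   for t, bucket in zip(unique, buckets):
--     for sent in bucket:
--       source_text = f"context: {sent} answer: {t} </s>"
--       qg_inputs.append(source_text)
--       qg_examples.append({'answer': t, "source_text": source_text})
--   return qg_inputs, qg_examples
-- ===== Notes on version B (the rewrite author's own statement) =====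
-- stated objective: alternative
-- what changed: Transposes A's answer-major scan with an interleaved seen-dict into three decoupled phases: dedup all answer texts, then a sentence-major pass that fills per-answer buckets of matching sentences (the matching loop runs in the opposite nesting order), then a separate emission pass over (text, bucket) pairs; output order is identical because buckets preserve sentence order.
import Mathlib
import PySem

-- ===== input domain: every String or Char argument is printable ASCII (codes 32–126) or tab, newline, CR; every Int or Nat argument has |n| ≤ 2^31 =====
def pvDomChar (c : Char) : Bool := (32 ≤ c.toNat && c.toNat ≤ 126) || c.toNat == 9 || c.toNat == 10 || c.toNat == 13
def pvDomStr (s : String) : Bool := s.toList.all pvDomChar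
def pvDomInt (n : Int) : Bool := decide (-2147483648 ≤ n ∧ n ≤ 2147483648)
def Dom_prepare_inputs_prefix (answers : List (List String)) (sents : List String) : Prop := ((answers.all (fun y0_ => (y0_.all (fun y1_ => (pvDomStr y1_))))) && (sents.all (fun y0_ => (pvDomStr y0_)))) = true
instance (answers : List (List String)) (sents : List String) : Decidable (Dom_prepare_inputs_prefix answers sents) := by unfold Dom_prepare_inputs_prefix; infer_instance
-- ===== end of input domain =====

-- B transposes A's answer-major scan with interleaved dedup into three phases: dedup, a
-- sentence-major pass filling per-answer buckets, then a separate emission pass; objective: alternative.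

-- ===== PORT A =====
-- the f-string f"context: {sent} answer: {answer_text} </s>"
def pvSrc (answer_text sent : String) : String :=
  "context: " ++ sent ++ " answer: " ++ answer_text ++ " </s>"

-- state: (qg_inputs, qg_examples, loaded)
def pvStepSent (answer_text : String)
    (st : List String × List (List (String × String)) × PySem.Dict String Int)
    (sent : String) : List String × List (List (String × String)) × PySem.Dict String Int :=
  if PySem.Str.isIn answer_text sent then
    (st.1 ++ [pvSrc answer_text sent],
     st.2.1 ++ [[("answer", answer_text), ("source_text", pvSrc answer_text sent)]],
     st.2.2)
  else st

def pvStepText (sents : List String)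
    (st : List String × List (List (String × String)) × PySem.Dict String Int)
    (answer_text : String) : List String × List (List (String × String)) × PySem.Dict String Int :=
  if (st.2.2).contains answer_text then st
  else sents.foldl (pvStepSent answer_text) (st.1, st.2.1, (st.2.2).insert answer_text 1)

def prepare_inputs_prefix (answers : List (List String)) (sents : List String) :
    List String × (List (List (String × String))) :=
  let st := answers.foldl (fun st answer => answer.foldl (pvStepText sents) st)
    ([], [], PySem.Dict.empty)
  (st.1, st.2.1)

-- ===== PORT B =====
-- one sentence-major step: extend the bucket of every answer text occurring in sent
def pvFill (unique : List String) (bs : List (List String)) (sent : String) :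
    List (List String) :=
  (unique.zip bs).map (fun p => if PySem.Str.isIn p.1 sent then p.2 ++ [sent] else p.2)

-- emission over one (answer text, bucket) pair
def pvEmit (st : List String × List (List (String × String)))
    (p : String × List String) : List String × List (List (String × String)) :=
  p.2.foldl (fun st sent =>
    (st.1 ++ [pvSrc p.1 sent],
     st.2 ++ [[("answer", p.1), ("source_text", pvSrc p.1 sent)]])) st

def prepare_inputs_prefix_alt (answers : List (List String)) (sents : List String) :
    List String × (List (List (String × String))) :=
  let unique := PySem.List.dedup (answers.flatMap id)
  let buckets := sents.foldl (pvFill unique) (unique.map (fun _ => []))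
  (unique.zip buckets).foldl pvEmit ([], [])

-- ===== PRECONDITION & SPEC =====
def Spec_prepare_inputs_prefix (answers : List (List String)) (sents : List String) (out : List String × (List (List (String × String)))) : Prop := out = prepare_inputs_prefix_alt answers sents
instance (answers : List (List String)) (sents : List String) (out : List String × (List (List (String × String)))) : Decidable (Spec_prepare_inputs_prefix answers sents out) := by unfold Spec_prepare_inputs_prefix; infer_instance

-- ===== CLAIM (what is proved, stated in full; the proofs are below) =====
def Claim_equal_prepare_inputs_prefix : Prop := ∀ (answers : List (List String)) (sents : List String), Dom_prepare_inputs_prefix answers sents → Spec_prepare_inputs_prefix answers sents (prepare_inputs_prefix answers sents)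

-- ===== LEMMAS AND PROOFS =====

-- the new elements the seen-set s gains while scanning ts (first occurrences, in order)
def pvUniqNew (s : List String) : List String → List String
  | [] => []
  | t :: ts => if t ∈ s then pvUniqNew s ts else t :: pvUniqNew (s ++ [t]) ts

def pvEmitIn (sents : List String) (t : String) : List String :=
  (sents.filter (fun s => PySem.Str.isIn t s)).map (fun s => pvSrc t s)

def pvEmitEx (sents : List String) (t : String) : List (List (String × String)) :=
  (sents.filter (fun s => PySem.Str.isIn t s)).map
    (fun s => [("answer", t), ("source_text", pvSrc t s)])

lemma pv_inner (t : String) (sents : List String) :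
    ∀ (ins : List String) (exs : List (List (String × String))) (ld : PySem.Dict String Int),
    sents.foldl (pvStepSent t) (ins, exs, ld)
      = (ins ++ pvEmitIn sents t, exs ++ pvEmitEx sents t, ld) := by
  induction sents with
  | nil => intro ins exs ld; simp [pvEmitIn, pvEmitEx]
  | cons s ss ih =>
    intro ins exs ld
    by_cases h : PySem.Chars.isIn t.toList s.toList = true <;>
      simp [pvStepSent, h, pvEmitIn, pvEmitEx, List.foldl_cons, ih]

lemma pv_outer (sents : List String) :
    ∀ (ts : List String) (s : List String) (ld : PySem.Dict String Int)
      (ins : List String) (exs : List (List (String × String))),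
    (∀ x : String, ld.contains x = true ↔ x ∈ s) →
    ∃ ld', ts.foldl (pvStepText sents) (ins, exs, ld)
      = (ins ++ (pvUniqNew s ts).flatMap (pvEmitIn sents),
         exs ++ (pvUniqNew s ts).flatMap (pvEmitEx sents), ld') := by
  intro ts
  induction ts with
  | nil => intro s ld ins exs _; exact ⟨ld, by simp [pvUniqNew]⟩
  | cons t ts ih =>
    intro s ld ins exs hk
    by_cases hmem : t ∈ s
    · have hc : ld.contains t = true := (hk t).mpr hmem
      obtain ⟨ld', h⟩ := ih s ld ins exs hk
      exact ⟨ld', by simpa [pvStepText, hc, pvUniqNew, hmem] using h⟩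
    · have hc : ld.contains t = false := by
        by_contra h
        exact hmem ((hk t).mp (by revert h; cases ld.contains t <;> simp))
      have hk' : ∀ x : String, (ld.insert t 1).contains x = true ↔ x ∈ s ++ [t] := by
        intro x
        rw [PySem.Dict.contains_insert]
        constructor
        · intro h
          rcases Bool.or_eq_true_iff.mp h with h | h
          · simp [eq_of_beq h]
          · simp [(hk x).mp h]
        · intro h
          rcases List.mem_append.mp h with h | h
          · exact Bool.or_eq_true_iff.mpr (Or.inr ((hk x).mpr h))
          · simp at h; simp [h]
      obtain ⟨ld', h⟩ := ih (s ++ [t]) (ld.insert t 1)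
        (ins ++ pvEmitIn sents t) (exs ++ pvEmitEx sents t) hk'
      refine ⟨ld', ?_⟩
      simp only [List.foldl_cons, pvStepText, hc, Bool.false_eq_true, if_false, pv_inner]
      simp [pvUniqNew, hmem, h]

lemma pv_flatten (answers : List (List String)) (sents : List String)
    (init : List String × List (List (String × String)) × PySem.Dict String Int) :
    answers.foldl (fun st answer => answer.foldl (pvStepText sents) st) init
      = (answers.flatMap id).foldl (pvStepText sents) init := by
  induction answers generalizing init with
  | nil => rfl
  | cons a as ih => simp [List.foldl_cons, List.foldl_append, ih]

lemma pv_ofList_uniqNew : ∀ (ts s : List String),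
    ts.foldl PySem.Set.add s = s ++ pvUniqNew s ts := by
  intro ts
  induction ts with
  | nil => intro s; simp [pvUniqNew]
  | cons t ts ih =>
    intro s
    by_cases h : t ∈ s
    · simp [List.foldl_cons, PySem.Set.add, PySem.Set.contains_eq_listContains, h, pvUniqNew, ih]
    · simp [List.foldl_cons, PySem.Set.add, PySem.Set.contains_eq_listContains, h, pvUniqNew, ih]

lemma pv_dedup_uniqNew (ts : List String) :
    PySem.List.dedup ts = pvUniqNew [] ts := by
  rw [PySem.List.dedup_eq_ofList, PySem.Set.ofList_eq_foldl, pv_ofList_uniqNew]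
  simp

-- B-side: mapping over a list zipped with a map of itself is a map
lemma pv_zip_map_map {β γ : Type} (u : List String) (f : String → β)
    (g : String × β → γ) :
    ((u.zip (u.map f)).map g) = u.map (fun t => g (t, f t)) := by
  induction u with
  | nil => rfl
  | cons t ts ih => simp [ih]

lemma pv_zip_flatMap {β γ : Type} (u : List String) (f : String → β)
    (g : String × β → List γ) :
    ((u.zip (u.map f)).flatMap g) = u.flatMap (fun t => g (t, f t)) := by
  induction u with
  | nil => rfl
  | cons t ts ih => simp [ih]

-- B-side bucket invariant: after scanning sents, bucket of t = sentences so far containing t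
lemma pv_buckets (u : List String) :
    ∀ (sents pr : List String),
    sents.foldl (pvFill u) (u.map (fun t => pr.filter (fun s => PySem.Str.isIn t s)))
      = u.map (fun t => (pr ++ sents).filter (fun s => PySem.Str.isIn t s)) := by
  intro sents
  induction sents with
  | nil => intro pr; simp
  | cons s ss ih =>
    intro pr
    have step : pvFill u (u.map (fun t => pr.filter (fun x => PySem.Str.isIn t x))) s
        = u.map (fun t => (pr ++ [s]).filter (fun x => PySem.Str.isIn t x)) := by
      unfold pvFill
      rw [pv_zip_map_map]
      refine List.map_congr_left (fun t _ => ?_)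
      by_cases h : PySem.Chars.isIn t.toList s.toList = true <;>
        simp [PySem.Str.isIn, h, List.filter_append]
    calc (s :: ss).foldl (pvFill u) (u.map (fun t => pr.filter (fun x => PySem.Str.isIn t x)))
        = ss.foldl (pvFill u) (u.map (fun t => (pr ++ [s]).filter (fun x => PySem.Str.isIn t x))) := by
          rw [List.foldl_cons, step]
      _ = u.map (fun t => (pr ++ s :: ss).filter (fun x => PySem.Str.isIn t x)) := by
          rw [ih]; simp
  
-- B-side emission: fold over (text, bucket) pairs appends the concatenated outputs
lemma pv_emit_one (t : String) :
    ∀ (b : List String) (ins : List String) (exs : List (List (String × String))),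
    pvEmit (ins, exs) (t, b)
      = (ins ++ b.map (fun s => pvSrc t s),
         exs ++ b.map (fun s => [("answer", t), ("source_text", pvSrc t s)])) := by
  intro b
  induction b with
  | nil => intro ins exs; simp [pvEmit]
  | cons s ss ih =>
    intro ins exs
    simpa [pvEmit] using
      ih (ins ++ [pvSrc t s]) (exs ++ [[("answer", t), ("source_text", pvSrc t s)]])

lemma pv_emit_fold :
    ∀ (ps : List (String × List String)) (ins : List String)
      (exs : List (List (String × String))),
    ps.foldl pvEmit (ins, exs)
      = (ins ++ ps.flatMap (fun p => p.2.map (fun s => pvSrc p.1 s)),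
         exs ++ ps.flatMap (fun p => p.2.map
           (fun s => [("answer", p.1), ("source_text", pvSrc p.1 s)]))) := by
  intro ps
  induction ps with
  | nil => intro ins exs; simp
  | cons p ps ih =>
    intro ins exs
    rw [List.foldl_cons, show p = (p.1, p.2) from rfl, pv_emit_one]
    simp [ih]

lemma pv_alt_eq (answers : List (List String)) (sents : List String) :
    prepare_inputs_prefix_alt answers sents
      = ((PySem.List.dedup (answers.flatMap id)).flatMap (pvEmitIn sents),
         (PySem.List.dedup (answers.flatMap id)).flatMap (pvEmitEx sents)) := by
  rw [show prepare_inputs_prefix_alt answers sents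
      = List.foldl pvEmit ([], []) ((PySem.List.dedup (answers.flatMap id)).zip
          (sents.foldl (pvFill (PySem.List.dedup (answers.flatMap id)))
            ((PySem.List.dedup (answers.flatMap id)).map (fun _ => [])))) from rfl]
  have hb := pv_buckets (PySem.List.dedup (answers.flatMap id)) sents []
  simp only [List.nil_append] at hb
  have hinit : (PySem.List.dedup (answers.flatMap id)).map (fun _ => ([] : List String))
      = (PySem.List.dedup (answers.flatMap id)).map
          (fun t => ([] : List String).filter (fun s => PySem.Str.isIn t s)) := by simp
  rw [hinit, hb, pv_emit_fold, pv_zip_flatMap, pv_zip_flatMap]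
  rfl

-- A-side closed form
lemma pv_a_eq (answers : List (List String)) (sents : List String) :
    prepare_inputs_prefix answers sents
      = ((pvUniqNew [] (answers.flatMap id)).flatMap (pvEmitIn sents),
         (pvUniqNew [] (answers.flatMap id)).flatMap (pvEmitEx sents)) := by
  show ((answers.foldl (fun st answer => answer.foldl (pvStepText sents) st)
          ([], [], PySem.Dict.empty)).1,
        (answers.foldl (fun st answer => answer.foldl (pvStepText sents) st)
          ([], [], PySem.Dict.empty)).2.1) = _
  rw [pv_flatten]
  obtain ⟨ld', h⟩ := pv_outer sents (answers.flatMap id) [] PySem.Dict.empty [] []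
    (by intro x; simp [PySem.Dict.contains_empty])
  rw [h]; rfl

-- ===== VERDICT (by name: the statement is the Claim_ definition above) =====
theorem prepare_inputs_prefix_spec : Claim_equal_prepare_inputs_prefix := by
  intro answers sents _
  unfold Spec_prepare_inputs_prefix
  rw [pv_a_eq, pv_alt_eq, pv_dedup_uniqNew]
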